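-- pv_equiv track=rewrite | github.com/jd-oh/SokobanInteligente | RobotAgentOriginal.py | sortNeighborhoods
-- ===== SOURCE A (Python) =====
-- def sortNeighborhoods(listaPosiblesPosiciones, posActual):
--     listaPosiblesPosiciones = listaPosiblesPosiciones.copy()  # Crea una copia de la lista
--     posicionesOrdenadas = []
--     posiciones = [(posActual[0] - 1, posActual[1]), (posActual[0], posActual[1] + 1),
--                 (posActual[0] + 1, posActual[1]), (posActual[0], posActual[1] - 1)]
--
--     for pos in posiciones:
--         if pos in listaPosiblesPosiciones:
--             listaPosiblesPosiciones.remove(pos)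
--             posicionesOrdenadas.append(pos)
--
--     return posicionesOrdenadas + listaPosiblesPosiciones
-- ===== SOURCE B (Python) =====
-- def sortNeighborhoods(listaPosiblesPosiciones, posActual):
--     # decorate-sort-undecorate: give each position a sort key (its direction
--     # priority on first occurrence, 4 otherwise) and stable-sort by that key
--     prio = {(posActual[0] - 1, posActual[1]): 0, (posActual[0], posActual[1] + 1): 1,
--             (posActual[0] + 1, posActual[1]): 2, (posActual[0], posActual[1] - 1): 3}
--     keyed = []
--     for x in listaPosiblesPosiciones:
--         keyed.append(prio.pop(x, 4))
--     return [x for _, x in sorted(zip(keyed, listaPosiblesPosiciones), key=lambda t: t[0])]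
-- ===== Notes on version B (the rewrite author's own statement) =====
-- stated objective: alternative
-- what changed: A makes four membership-test plus list.remove selection passes over the candidate list; B instead decorates each element once with a sort key (its direction priority, consumed from a dict so only the first occurrence gets it, 4 otherwise) and stable-sorts the decorated list by key (decorate-sort-undecorate).
import Mathlib
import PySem

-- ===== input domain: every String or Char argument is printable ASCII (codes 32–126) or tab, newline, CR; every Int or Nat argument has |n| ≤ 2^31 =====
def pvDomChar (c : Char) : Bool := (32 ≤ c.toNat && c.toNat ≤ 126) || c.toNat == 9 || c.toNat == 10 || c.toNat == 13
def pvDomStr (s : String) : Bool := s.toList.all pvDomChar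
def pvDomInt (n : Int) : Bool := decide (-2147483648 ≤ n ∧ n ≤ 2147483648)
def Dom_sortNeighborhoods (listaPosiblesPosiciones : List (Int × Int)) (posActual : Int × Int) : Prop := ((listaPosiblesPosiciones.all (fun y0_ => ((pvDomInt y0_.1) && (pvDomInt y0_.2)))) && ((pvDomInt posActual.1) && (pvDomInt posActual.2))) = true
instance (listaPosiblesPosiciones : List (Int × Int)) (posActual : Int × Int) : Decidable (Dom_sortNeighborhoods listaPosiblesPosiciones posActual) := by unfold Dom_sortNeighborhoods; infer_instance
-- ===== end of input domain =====

-- B replaces A's four membership-test-plus-list.remove selection passes by decorate-sort-undecorate: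
-- each element gets a sort key (its direction priority, consumed from a dict so only the first
-- occurrence gets it, 4 otherwise) and a stable sort by key produces the result (objective:
-- alternative algorithm; return value only — A copies its argument, neither mutates the caller's list).

-- ===== PORT A =====
-- A's loop: for pos in posiciones: if pos in lista: lista.remove(pos); ordenadas.append(pos)
def sortNeighborhoods (listaPosiblesPosiciones : List (Int × Int)) (posActual : Int × Int) : List (Int × Int) :=
  let posiciones : List (Int × Int) :=
    [(posActual.1 - 1, posActual.2), (posActual.1, posActual.2 + 1),
     (posActual.1 + 1, posActual.2), (posActual.1, posActual.2 - 1)]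
  let st := posiciones.foldl
    (fun (st : List (Int × Int) × List (Int × Int)) pos =>
      if st.1.contains pos then
        ((PySem.List.remove? st.1 pos).getD st.1, st.2 ++ [pos])  -- guarded, so remove? never raises
      else st)
    (listaPosiblesPosiciones, [])
  st.2 ++ st.1

-- ===== PORT B =====
-- B: prio = {up:0, right:1, down:2, left:3}; for x in lista: keyed.append(prio.pop(x, 4));
--    return [x for _, x in sorted(zip(keyed, lista), key=lambda t: t[0])]
def sortNeighborhoods_alt (listaPosiblesPosiciones : List (Int × Int)) (posActual : Int × Int) : List (Int × Int) :=
  let prio : PySem.Dict (Int × Int) Int :=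
    ((((PySem.Dict.empty).insert (posActual.1 - 1, posActual.2) 0).insert
        (posActual.1, posActual.2 + 1) 1).insert
        (posActual.1 + 1, posActual.2) 2).insert (posActual.1, posActual.2 - 1) 3
  let st := listaPosiblesPosiciones.foldl
    (fun (st : PySem.Dict (Int × Int) Int × List Int) x =>
      (st.1.erase x, st.2 ++ [st.1.getD x 4]))   -- prio.pop(x, 4): value (default 4), key removed
    (prio, [])
  (PySem.List.sorted (st.2.zip listaPosiblesPosiciones) (fun t => t.1)).map (fun t => t.2)

-- ===== PRECONDITION & SPEC =====
def Spec_sortNeighborhoods (listaPosiblesPosiciones : List (Int × Int)) (posActual : Int × Int) (out : List (Int × Int)) : Prop := out = sortNeighborhoods_alt listaPosiblesPosiciones posActual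
instance (listaPosiblesPosiciones : List (Int × Int)) (posActual : Int × Int) (out : List (Int × Int)) : Decidable (Spec_sortNeighborhoods listaPosiblesPosiciones posActual out) := by unfold Spec_sortNeighborhoods; infer_instance

-- ===== CLAIM (what is proved, stated in full; the proofs are below) =====
def Claim_equal_sortNeighborhoods : Prop := ∀ (listaPosiblesPosiciones : List (Int × Int)) (posActual : Int × Int), Dom_sortNeighborhoods listaPosiblesPosiciones posActual → Spec_sortNeighborhoods listaPosiblesPosiciones posActual (sortNeighborhoods listaPosiblesPosiciones posActual)

-- ===== LEMMAS AND PROOFS =====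

-- ---- A-side: characterisation of the remove-loop ----

theorem pv_foldl_erase_cons_notmem (c : List (Int × Int)) (x : Int × Int) (l : List (Int × Int))
    (hx : x ∉ c) : List.foldl List.erase (x :: l) c = x :: List.foldl List.erase l c := by
  induction c generalizing l with
  | nil => rfl
  | cons a c ih =>
    have hne : x ≠ a := fun h => hx (h ▸ List.mem_cons_self)
    have hx' : x ∉ c := fun h => hx (List.mem_cons_of_mem _ h)
    simp only [List.foldl_cons]
    rw [List.erase_cons_tail (by simp [hne])]
    exact ih _ hx'

theorem pv_foldl_erase_pull (c : List (Int × Int)) (x : Int × Int) (l : List (Int × Int))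
    (hx : x ∈ c) :
    List.foldl List.erase l c = List.foldl List.erase (l.erase x) (c.erase x) := by
  induction c generalizing l with
  | nil => cases hx
  | cons a c ih =>
    by_cases hax : a = x
    · subst hax
      simp [List.erase_cons_head]
    · have hx' : x ∈ c := by
        rcases List.mem_cons.mp hx with h | h
        · exact absurd h.symm hax
        · exact h
      simp only [List.foldl_cons]
      rw [ih _ hx', List.erase_comm]
      rw [List.erase_cons_tail (by simp [hax])]
      simp

-- A's loop over any duplicate-free priority list, characterised.
theorem pv_aLoop_char (prios : List (Int × Int)) (lista ord : List (Int × Int))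
    (h : prios.Nodup) :
    prios.foldl
      (fun (st : List (Int × Int) × List (Int × Int)) pos =>
        if st.1.contains pos then
          ((PySem.List.remove? st.1 pos).getD st.1, st.2 ++ [pos])
        else st)
      (lista, ord)
    = (List.foldl List.erase lista (prios.filter (fun p => lista.contains p)),
       ord ++ prios.filter (fun p => lista.contains p)) := by
  induction prios generalizing lista ord with
  | nil => simp
  | cons p ps ih =>
    have hp : p ∉ ps := (List.nodup_cons.mp h).1
    have hps : ps.Nodup := (List.nodup_cons.mp h).2
    by_cases hmem : p ∈ lista
    · have hcont : lista.contains p = true := by simpa using hmem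
      have hrem : (PySem.List.remove? lista p).getD lista = lista.erase p := by
        rw [PySem.List.remove?_eq_some_erase lista p hmem]; rfl
      have hfilt : ps.filter (fun q => (lista.erase p).contains q)
          = ps.filter (fun q => lista.contains q) := by
        apply List.filter_congr
        intro q hq
        have hqp : q ≠ p := fun hEq => hp (hEq ▸ hq)
        simp [List.mem_erase_of_ne hqp]
      rw [List.foldl_cons, if_pos hcont, hrem, ih (lista.erase p) (ord ++ [p]) hps, hfilt,
        List.filter_cons, if_pos hcont]
      simp
    · have hcont : lista.contains p = false := by simpa using hmem
      rw [List.foldl_cons, if_neg (by rw [hcont]; simp), ih lista ord hps,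
        List.filter_cons, if_neg (by rw [hcont]; simp)]

theorem pv_posiciones_nodup (r c : Int) :
    ([(r - 1, c), (r, c + 1), (r + 1, c), (r, c - 1)] : List (Int × Int)).Nodup := by
  simp only [List.nodup_cons, List.mem_cons, List.not_mem_nil, or_false, List.nodup_nil,
    and_true, Prod.mk.injEq, not_or, not_false_iff]
  refine ⟨⟨?_, ?_, ?_⟩, ⟨?_, ?_⟩, ?_⟩ <;> intro h <;> omega

-- ---- B-side: the keying pass as a structural recursion ----

-- the sequence of (key, element) pairs produced by B's pop-loop
def pvPairs (d : PySem.Dict (Int × Int) Int) : List (Int × Int) → List (Int × (Int × Int))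
  | [] => []
  | x :: xs => (d.getD x 4, x) :: pvPairs (d.erase x) xs

theorem pv_foldl_keyed (xs : List (Int × Int)) (d : PySem.Dict (Int × Int) Int)
    (acc : List Int) :
    (xs.foldl (fun (st : PySem.Dict (Int × Int) Int × List Int) x =>
        (st.1.erase x, st.2 ++ [st.1.getD x 4])) (d, acc)).2
    = acc ++ (pvPairs d xs).map (fun t => t.1) := by
  induction xs generalizing d acc with
  | nil => simp [pvPairs]
  | cons x xs ih => simp [pvPairs, ih]

theorem pv_map_fst_zip (d : PySem.Dict (Int × Int) Int) (xs : List (Int × Int)) :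
    ((pvPairs d xs).map (fun t => t.1)).zip xs = pvPairs d xs := by
  induction xs generalizing d with
  | nil => simp [pvPairs]
  | cons x xs ih => simp [pvPairs, ih]

-- ---- small facts about Dict.erase / getD (specific to this key/value type) ----

theorem pv_items_erase (d : PySem.Dict (Int × Int) Int) (x : Int × Int) :
    (d.erase x).items = d.items.filter (fun p => !(p.1 == x)) := rfl

theorem pv_map_fst_filter (l : List ((Int × Int) × Int)) (x : Int × Int) :
    (l.filter (fun p => !(p.1 == x))).map (fun p => p.1)
    = (l.map (fun p => p.1)).filter (fun y => !(y == x)) := by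
  induction l with
  | nil => rfl
  | cons p l ih =>
    by_cases h : p.1 = x <;> simp [h, ih]

theorem pv_keys_erase (d : PySem.Dict (Int × Int) Int) (x : Int × Int) :
    (d.erase x).keys = d.keys.filter (fun y => !(y == x)) := by
  simp only [PySem.Dict.keys, pv_items_erase]
  exact pv_map_fst_filter d.items x

theorem pv_values_erase_sublist (d : PySem.Dict (Int × Int) Int) (x : Int × Int) :
    ((d.erase x).values).Sublist d.values := by
  simp only [PySem.Dict.values, pv_items_erase]
  exact List.Sublist.map _ List.filter_sublist

theorem pv_mem_erase_items (d : PySem.Dict (Int × Int) Int) (x k : Int × Int) (v : Int)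
    (hk : k ≠ x) (h : (k, v) ∈ d.items) : (k, v) ∈ (d.erase x).items := by
  rw [pv_items_erase]
  exact List.mem_filter.mpr ⟨h, by simp [hk]⟩

theorem pv_mem_values_of_mem_items (d : PySem.Dict (Int × Int) Int) (k : Int × Int) (v : Int)
    (h : (k, v) ∈ d.items) : v ∈ d.values := by
  simp only [PySem.Dict.values]
  exact List.mem_map.mpr ⟨(k, v), h, rfl⟩

theorem pv_getD_cases (d : PySem.Dict (Int × Int) Int) (x : Int × Int) :
    (x, d.getD x 4) ∈ d.items ∨ (d.getD x 4 = 4 ∧ x ∉ d.keys) := by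
  cases h : d.get? x with
  | none =>
    right
    constructor
    · rw [PySem.Dict.getD_eq_get?_getD, h]; rfl
    · intro hx
      have hc : d.contains x = true := (PySem.Dict.contains_iff_mem_keys d x).mpr hx
      rw [PySem.Dict.contains_eq_isSome_get?, h] at hc
      simp at hc
  | some v =>
    left
    have : d.getD x 4 = v := by rw [PySem.Dict.getD_eq_get?_getD, h]; rfl
    rw [this]
    exact PySem.Dict.mem_items_of_get?_eq_some d h

theorem pv_getD_mem_or (d : PySem.Dict (Int × Int) Int) (x : Int × Int) :
    d.getD x 4 ∈ d.values ∨ d.getD x 4 = 4 := by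
  rcases pv_getD_cases d x with h | h
  · exact Or.inl (pv_mem_values_of_mem_items d x _ h)
  · exact Or.inr h.1

-- keys produced by the pop-loop are priority values or the default 4
theorem pv_keys_mem (d : PySem.Dict (Int × Int) Int) (xs : List (Int × Int)) :
    ∀ p ∈ pvPairs d xs, p.1 ∈ d.values ∨ p.1 = 4 := by
  induction xs generalizing d with
  | nil => simp [pvPairs]
  | cons x xs ih =>
    intro p hp
    rcases List.mem_cons.mp hp with h | h
    · subst h; exact pv_getD_mem_or d x
    · rcases ih (d.erase x) p h with h' | h'
      · exact Or.inl ((pv_values_erase_sublist d x).mem h')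
      · exact Or.inr h'

-- no pair carries a key that is not (any longer) a value of the dict
theorem pv_filter_absent (xs : List (Int × Int)) (d : PySem.Dict (Int × Int) Int) (v : Int)
    (hv4 : v ≠ 4) (hnv : v ∉ d.values) :
    (pvPairs d xs).filter (fun p => p.1 == v) = [] := by
  induction xs generalizing d with
  | nil => rfl
  | cons x xs ih =>
    have hne : d.getD x 4 ≠ v := by
      rcases pv_getD_mem_or d x with h | h
      · exact fun hEq => hnv (hEq ▸ h)
      · rw [h]; exact fun hEq => hv4 hEq.symm
    rw [pvPairs, List.filter_cons, if_neg (by simp [hne])]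
    exact ih (d.erase x) (fun h => hnv ((pv_values_erase_sublist d x).mem h))

-- the group of a priority value v keyed by k: exactly k, iff k occurs in xs
theorem pv_filter_prio (xs : List (Int × Int)) (d : PySem.Dict (Int × Int) Int)
    (k : Int × Int) (v : Int) (hk : d.keys.Nodup) (hv : d.values.Nodup)
    (h4 : (4 : Int) ∉ d.values) (hm : (k, v) ∈ d.items) :
    ((pvPairs d xs).filter (fun p => p.1 == v)).map (fun t => t.2)
    = if k ∈ xs then [k] else [] := by
  have hvney : v ≠ 4 := fun hEq => h4 (hEq ▸ pv_mem_values_of_mem_items d k v hm)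
  induction xs generalizing d with
  | nil => simp [pvPairs]
  | cons x xs ih =>
    have hvinj := List.inj_on_of_nodup_map (f := fun p : (Int × Int) × Int => p.2)
      (l := d.items) (by simpa [PySem.Dict.values] using hv)
    by_cases hxk : x = k
    · subst hxk
      have hgd : d.getD x 4 = v := PySem.Dict.getD_of_mem_items d hm hk 4
      have htail : (pvPairs (d.erase x) xs).filter (fun p => p.1 == v) = [] := by
        apply pv_filter_absent xs (d.erase x) v hvney
        intro hvmem
        rcases List.mem_map.mp (by simpa only [PySem.Dict.values] using hvmem) with ⟨q, hq, hqv⟩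
        have hq' : q ∈ d.items ∧ q.1 ≠ x := by
          simpa [pv_items_erase] using hq
        have : q = (x, v) := hvinj hq'.1 hm (by simpa using hqv)
        exact hq'.2 (by rw [this])
      rw [pvPairs, List.filter_cons, if_pos (by simp [hgd]), htail]
      simp
    · have hkx : k ≠ x := fun h => hxk h.symm
      have hne : d.getD x 4 ≠ v := by
        rcases pv_getD_cases d x with h | h
        · intro hEq
          have : (x, d.getD x 4) = (k, v) := hvinj h hm (by simpa using hEq)
          exact hxk (congrArg Prod.fst this)
        · rw [h.1]; exact fun hEq => hvney hEq.symm
      have hkeys' : (d.erase x).keys.Nodup := by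
        rw [pv_keys_erase]; exact hk.filter _
      have hvals' : (d.erase x).values.Nodup := hv.sublist (pv_values_erase_sublist d x)
      have h4' : (4 : Int) ∉ (d.erase x).values :=
        fun h => h4 ((pv_values_erase_sublist d x).mem h)
      have hm' : (k, v) ∈ (d.erase x).items := pv_mem_erase_items d x k v hkx hm
      rw [pvPairs, List.filter_cons, if_neg (by simp [hne]),
        ih (d.erase x) hkeys' hvals' h4' hm']
      simp [List.mem_cons, hkx]

-- the default-key group: xs with the first occurrence of each present dict key removed
theorem pv_filter_rest (xs : List (Int × Int)) (d : PySem.Dict (Int × Int) Int)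
    (hk : d.keys.Nodup) (h4 : (4 : Int) ∉ d.values) :
    ((pvPairs d xs).filter (fun p => p.1 == 4)).map (fun t => t.2)
    = List.foldl List.erase xs (d.keys.filter (fun y => xs.contains y)) := by
  induction xs generalizing d with
  | nil =>
    simp [pvPairs]
  | cons x t ih =>
    have hkeys' : (d.erase x).keys.Nodup := by
      rw [pv_keys_erase]; exact hk.filter _
    have h4' : (4 : Int) ∉ (d.erase x).values :=
      fun h => h4 ((pv_values_erase_sublist d x).mem h)
    by_cases hx : x ∈ d.keys
    · rcases pv_getD_cases d x with hmem | habs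
      swap
      · exact absurd hx habs.2
      have hne : d.getD x 4 ≠ 4 := by
        intro hEq
        exact h4 (hEq ▸ pv_mem_values_of_mem_items d x _ hmem)
      have hF : x ∈ d.keys.filter (fun y => (x :: t).contains y) :=
        List.mem_filter.mpr ⟨hx, by simp⟩
      have hFnd : (d.keys.filter (fun y => (x :: t).contains y)).Nodup := hk.filter _
      have hFe : (d.keys.filter (fun y => (x :: t).contains y)).erase x
          = (d.erase x).keys.filter (fun y => t.contains y) := by
        rw [hFnd.erase_eq_filter, List.filter_filter, pv_keys_erase, List.filter_filter]
        apply List.filter_congr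
        intro y _
        by_cases hyx : y = x
        · simp [hyx]
        · simp [hyx, Bool.and_comm, bne]
      rw [pvPairs, List.filter_cons, if_neg (by simp [hne]), ih (d.erase x) hkeys' h4',
        pv_foldl_erase_pull _ x _ hF, List.erase_cons_head, hFe]
    · have hgd : d.getD x 4 = 4 := by
        rcases pv_getD_cases d x with hmem | habs
        · exact absurd (by
            have : x ∈ d.items.map (fun p => p.1) := List.mem_map.mpr ⟨_, hmem, rfl⟩
            simpa [PySem.Dict.keys] using this) hx
        · exact habs.1
      have hkeq : (d.erase x).keys = d.keys := by
        rw [pv_keys_erase]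
        apply List.filter_eq_self.mpr
        intro y hy
        have : y ≠ x := fun h => hx (h ▸ hy)
        simp [this]
      have hFeq : d.keys.filter (fun y => (x :: t).contains y)
          = d.keys.filter (fun y => t.contains y) := by
        apply List.filter_congr
        intro y hy
        have : y ≠ x := fun h => hx (h ▸ hy)
        simp [this]
      have hxF : x ∉ d.keys.filter (fun y => t.contains y) :=
        fun h => hx (List.mem_filter.mp h).1
      rw [pvPairs, List.filter_cons, if_pos (by simp [hgd]), List.map_cons,
        ih (d.erase x) hkeys' h4', hkeq, hFeq,
        pv_foldl_erase_cons_notmem _ x t hxF]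

-- ---- the stable sort, partitioned into its five key groups ----

theorem pv_insertBy_middle {α : Type} (before : α → α → Bool) (x : α) (A B : List α)
    (hA : ∀ a ∈ A, before x a = false) (hB : ∀ b ∈ B, before x b = true) :
    PySem.List.insertBy before x (A ++ B) = A ++ x :: B := by
  induction A with
  | nil =>
    cases B with
    | nil => simp [PySem.List.insertBy]
    | cons b bs => simp [PySem.List.insertBy, hB b List.mem_cons_self]
  | cons a A' ih =>
    have ha : before x a = false := hA a List.mem_cons_self
    have hA' : ∀ a' ∈ A', before x a' = false := fun a' h => hA a' (List.mem_cons_of_mem _ h)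
    simp [PySem.List.insertBy, ha, ih hA']

theorem pv_sorted_partition (l : List (Int × (Int × Int)))
    (h : ∀ p ∈ l, p.1 = 0 ∨ p.1 = 1 ∨ p.1 = 2 ∨ p.1 = 3 ∨ p.1 = 4) :
    PySem.List.sorted l (fun t => t.1)
    = l.filter (fun p => p.1 == 0) ++ l.filter (fun p => p.1 == 1)
      ++ l.filter (fun p => p.1 == 2) ++ l.filter (fun p => p.1 == 3)
      ++ l.filter (fun p => p.1 == 4) := by
  induction l using List.reverseRecOn with
  | nil => simp [PySem.List.sorted_eq_foldl_insertBy]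
  | append_singleton l x ih =>
    have hl : ∀ p ∈ l, p.1 = 0 ∨ p.1 = 1 ∨ p.1 = 2 ∨ p.1 = 3 ∨ p.1 = 4 :=
      fun p hp => h p (List.mem_append_left _ hp)
    have hx := h x (List.mem_append_right _ List.mem_cons_self)
    rw [PySem.List.sorted_eq_foldl_insertBy, List.foldl_append,
      ← PySem.List.sorted_eq_foldl_insertBy, ih hl]
    simp only [List.foldl_cons, List.foldl_nil, List.filter_append]
    rcases hx with h0 | h1 | h2 | h3 | h4
    · rw [show l.filter (fun p => p.1 == 0) ++ l.filter (fun p => p.1 == 1)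
          ++ l.filter (fun p => p.1 == 2) ++ l.filter (fun p => p.1 == 3)
          ++ l.filter (fun p => p.1 == 4)
        = l.filter (fun p => p.1 == 0)
          ++ (l.filter (fun p => p.1 == 1) ++ l.filter (fun p => p.1 == 2)
              ++ l.filter (fun p => p.1 == 3) ++ l.filter (fun p => p.1 == 4)) by
          simp [List.append_assoc]]
      rw [pv_insertBy_middle _ x _ _
        (fun a ha => by
          simp only [List.mem_filter, beq_iff_eq] at ha
          have hk : a.1 = 0 := ha.2
          simp [hk, h0])
        (fun b hb => by
          simp only [List.mem_append, List.mem_filter, beq_iff_eq] at hb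
          have hk : b.1 = 1 ∨ b.1 = 2 ∨ b.1 = 3 ∨ b.1 = 4 := by tauto
          rcases hk with hk | hk | hk | hk <;> simp [hk, h0])]
      simp [h0, List.append_assoc]
    · rw [show l.filter (fun p => p.1 == 0) ++ l.filter (fun p => p.1 == 1)
          ++ l.filter (fun p => p.1 == 2) ++ l.filter (fun p => p.1 == 3)
          ++ l.filter (fun p => p.1 == 4)
        = (l.filter (fun p => p.1 == 0) ++ l.filter (fun p => p.1 == 1))
          ++ (l.filter (fun p => p.1 == 2)
              ++ l.filter (fun p => p.1 == 3) ++ l.filter (fun p => p.1 == 4)) by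
          simp [List.append_assoc]]
      rw [pv_insertBy_middle _ x _ _
        (fun a ha => by
          simp only [List.mem_append, List.mem_filter, beq_iff_eq] at ha
          have hk : a.1 = 0 ∨ a.1 = 1 := by tauto
          rcases hk with hk | hk <;> simp [hk, h1])
        (fun b hb => by
          simp only [List.mem_append, List.mem_filter, beq_iff_eq] at hb
          have hk : b.1 = 2 ∨ b.1 = 3 ∨ b.1 = 4 := by tauto
          rcases hk with hk | hk | hk <;> simp [hk, h1])]
      simp [h1, List.append_assoc]
    · rw [show l.filter (fun p => p.1 == 0) ++ l.filter (fun p => p.1 == 1)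
          ++ l.filter (fun p => p.1 == 2) ++ l.filter (fun p => p.1 == 3)
          ++ l.filter (fun p => p.1 == 4)
        = (l.filter (fun p => p.1 == 0) ++ l.filter (fun p => p.1 == 1)
           ++ l.filter (fun p => p.1 == 2))
          ++ (l.filter (fun p => p.1 == 3) ++ l.filter (fun p => p.1 == 4)) by
          simp [List.append_assoc]]
      rw [pv_insertBy_middle _ x _ _
        (fun a ha => by
          simp only [List.mem_append, List.mem_filter, beq_iff_eq] at ha
          have hk : a.1 = 0 ∨ a.1 = 1 ∨ a.1 = 2 := by tauto
          rcases hk with hk | hk | hk <;> simp [hk, h2])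
        (fun b hb => by
          simp only [List.mem_append, List.mem_filter, beq_iff_eq] at hb
          have hk : b.1 = 3 ∨ b.1 = 4 := by tauto
          rcases hk with hk | hk <;> simp [hk, h2])]
      simp [h2, List.append_assoc]
    · rw [show l.filter (fun p => p.1 == 0) ++ l.filter (fun p => p.1 == 1)
          ++ l.filter (fun p => p.1 == 2) ++ l.filter (fun p => p.1 == 3)
          ++ l.filter (fun p => p.1 == 4)
        = (l.filter (fun p => p.1 == 0) ++ l.filter (fun p => p.1 == 1)
           ++ l.filter (fun p => p.1 == 2) ++ l.filter (fun p => p.1 == 3))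
          ++ l.filter (fun p => p.1 == 4) by
          simp [List.append_assoc]]
      rw [pv_insertBy_middle _ x _ _
        (fun a ha => by
          simp only [List.mem_append, List.mem_filter, beq_iff_eq] at ha
          have hk : a.1 = 0 ∨ a.1 = 1 ∨ a.1 = 2 ∨ a.1 = 3 := by tauto
          rcases hk with hk | hk | hk | hk <;> simp [hk, h3])
        (fun b hb => by
          simp only [List.mem_filter, beq_iff_eq] at hb
          have hk : b.1 = 4 := hb.2
          simp [hk, h3])]
      simp [h3, List.append_assoc]
    · rw [show l.filter (fun p => p.1 == 0) ++ l.filter (fun p => p.1 == 1)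
          ++ l.filter (fun p => p.1 == 2) ++ l.filter (fun p => p.1 == 3)
          ++ l.filter (fun p => p.1 == 4)
        = (l.filter (fun p => p.1 == 0) ++ l.filter (fun p => p.1 == 1)
           ++ l.filter (fun p => p.1 == 2) ++ l.filter (fun p => p.1 == 3)
           ++ l.filter (fun p => p.1 == 4)) ++ ([] : List (Int × (Int × Int))) by simp]
      rw [pv_insertBy_middle _ x _ _
        (fun a ha => by
          simp only [List.mem_append, List.mem_filter, beq_iff_eq] at ha
          have hk : a.1 = 0 ∨ a.1 = 1 ∨ a.1 = 2 ∨ a.1 = 3 ∨ a.1 = 4 := by tauto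
          rcases hk with hk | hk | hk | hk | hk <;> simp [hk, h4])
        (fun b hb => by cases hb)]
      simp [h4, List.append_assoc]

-- ---- the literal priority dict ----

theorem pv_prio_items (r c : Int) :
    (((((PySem.Dict.empty : PySem.Dict (Int × Int) Int).insert (r - 1, c) 0).insert
        (r, c + 1) 1).insert (r + 1, c) 2).insert (r, c - 1) 3).items
    = [((r - 1, c), 0), ((r, c + 1), 1), ((r + 1, c), 2), ((r, c - 1), 3)] := by
  have ne10 : ¬ ((r, c + 1) = (r - 1, c)) := by intro h; rw [Prod.mk.injEq] at h; omega
  have ne20 : ¬ ((r + 1, c) = (r - 1, c)) := by intro h; rw [Prod.mk.injEq] at h; omega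
  have ne21 : ¬ ((r + 1, c) = (r, c + 1)) := by intro h; rw [Prod.mk.injEq] at h; omega
  have ne30 : ¬ ((r, c - 1) = (r - 1, c)) := by intro h; rw [Prod.mk.injEq] at h; omega
  have ne31 : ¬ ((r, c - 1) = (r, c + 1)) := by intro h; rw [Prod.mk.injEq] at h; omega
  have ne32 : ¬ ((r, c - 1) = (r + 1, c)) := by intro h; rw [Prod.mk.injEq] at h; omega
  have h0 : (PySem.Dict.empty : PySem.Dict (Int × Int) Int).contains (r - 1, c) = false :=
    PySem.Dict.contains_empty _
  have h1 : ((PySem.Dict.empty : PySem.Dict (Int × Int) Int).insert (r - 1, c) 0).contains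
      (r, c + 1) = false := by
    rw [PySem.Dict.contains_insert]
    simp [ne10]
  have h2 : (((PySem.Dict.empty : PySem.Dict (Int × Int) Int).insert (r - 1, c) 0).insert
      (r, c + 1) 1).contains (r + 1, c) = false := by
    rw [PySem.Dict.contains_insert, PySem.Dict.contains_insert]
    simp [ne20, ne21]
  have h3 : ((((PySem.Dict.empty : PySem.Dict (Int × Int) Int).insert (r - 1, c) 0).insert
      (r, c + 1) 1).insert (r + 1, c) 2).contains (r, c - 1) = false := by
    rw [PySem.Dict.contains_insert, PySem.Dict.contains_insert, PySem.Dict.contains_insert]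
    simp [ne30, ne31, ne32]
  rw [PySem.Dict.items_insert_of_not_contains _ _ h3,
    PySem.Dict.items_insert_of_not_contains _ _ h2,
    PySem.Dict.items_insert_of_not_contains _ _ h1,
    PySem.Dict.items_insert_of_not_contains _ _ h0]
  rfl

-- ===== VERDICT (by name: the statement is the Claim_ definition above) =====
theorem sortNeighborhoods_spec : Claim_equal_sortNeighborhoods := by
  intro lista posActual _
  obtain ⟨r, c⟩ := posActual
  unfold Spec_sortNeighborhoods sortNeighborhoods sortNeighborhoods_alt
  simp only
  have hnodup := pv_posiciones_nodup r c
  rw [pv_aLoop_char _ lista [] hnodup]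
  simp only [List.nil_append]
  set prio : PySem.Dict (Int × Int) Int :=
    ((((PySem.Dict.empty).insert (r - 1, c) 0).insert
        (r, c + 1) 1).insert (r + 1, c) 2).insert (r, c - 1) 3 with hprio
  rw [pv_foldl_keyed, List.nil_append, pv_map_fst_zip]
  have hitems : prio.items
      = [((r - 1, c), 0), ((r, c + 1), 1), ((r + 1, c), 2), ((r, c - 1), 3)] := by
    rw [hprio]; exact pv_prio_items r c
  have hkeys : prio.keys = [(r - 1, c), (r, c + 1), (r + 1, c), (r, c - 1)] := by
    simp [PySem.Dict.keys, hitems]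
  have hvals : prio.values = [0, 1, 2, 3] := by
    simp [PySem.Dict.values, hitems]
  have hknd : prio.keys.Nodup := by rw [hkeys]; exact hnodup
  have hvnd : prio.values.Nodup := by rw [hvals]; decide
  have h4 : (4 : Int) ∉ prio.values := by rw [hvals]; decide
  rw [pv_sorted_partition _ (fun p hp => by
      rcases pv_keys_mem prio lista p hp with h | h
      · rw [hvals] at h
        have h' : p.1 = 0 ∨ p.1 = 1 ∨ p.1 = 2 ∨ p.1 = 3 := by simpa using h
        tauto
      · tauto)]
  simp only [List.map_append]
  rw [pv_filter_prio lista prio (r - 1, c) 0 hknd hvnd h4 (by rw [hitems]; simp),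
    pv_filter_prio lista prio (r, c + 1) 1 hknd hvnd h4 (by rw [hitems]; simp),
    pv_filter_prio lista prio (r + 1, c) 2 hknd hvnd h4 (by rw [hitems]; simp),
    pv_filter_prio lista prio (r, c - 1) 3 hknd hvnd h4 (by rw [hitems]; simp),
    pv_filter_rest lista prio hknd h4, hkeys]
  by_cases m0 : (r - 1, c) ∈ lista <;> by_cases m1 : (r, c + 1) ∈ lista <;>
    by_cases m2 : (r + 1, c) ∈ lista <;> by_cases m3 : (r, c - 1) ∈ lista <;>
    simp [m0, m1, m2, m3]
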